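-- pv_equiv track=rewrite | github.com/Orlann/PythonMentorshipProgram | WorkWithLogs/LogAnalyzer.py | form_array_with_max_size_for_date
-- ===== SOURCE A (Python) =====
-- def form_array_with_max_size_for_date(input_array):
--     output_array = [input_array[0]]
--     for i in range(1, len(input_array)):
--         flag = False
--         for j in range(0, len(output_array)):
--             if input_array[i][0] == output_array[j][0]:
--                 if input_array[i][2] > output_array[j][2]:
--                     output_array[j][1] = input_array[i][1]
--                     output_array[j][2] = input_array[i][2]
--                 flag = True
--                 break
--         if not flag:
--             output_array.append(input_array[i])
--     return output_array
-- ===== SOURCE B (Python) =====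
-- def form_array_with_max_size_for_date(input_array):
--     # Two staged passes: bucket the rows by key (first-seen order); then per group
--     # pick the first row attaining the maximal size with max() and write its
--     # name/size into the group's first row (same in-place mutation as A).
--     groups = {}
--     for row in input_array:
--         groups.setdefault(row[0], []).append(row)
--     result = []
--     for rows in groups.values():
--         first = rows[0]
--         if len(rows) > 1:
--             w = max(rows, key=lambda r: r[2])
--             first[1], first[2] = w[1], w[2]
--         result.append(first)
--     return result
-- ===== Notes on version B (the rewrite author's own statement) =====
-- stated objective: alternative
-- what changed: A incrementally rescans its growing output list for every input row; B works in two staged passes: first bucket all rows into a dict of per-key groups, then reduce each group independently with max(key=size) and write the winner's fields into the group's first row.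
-- outside the precondition, e.g. on form_array_with_max_size_for_date([]): A raises IndexError, B returns []; on form_array_with_max_size_for_date([[]]): A returns [[]], B raises IndexError; on form_array_with_max_size_for_date([[1, 2], [1, 9, 9]]): A raises IndexError, B raises IndexError
import Mathlib
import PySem

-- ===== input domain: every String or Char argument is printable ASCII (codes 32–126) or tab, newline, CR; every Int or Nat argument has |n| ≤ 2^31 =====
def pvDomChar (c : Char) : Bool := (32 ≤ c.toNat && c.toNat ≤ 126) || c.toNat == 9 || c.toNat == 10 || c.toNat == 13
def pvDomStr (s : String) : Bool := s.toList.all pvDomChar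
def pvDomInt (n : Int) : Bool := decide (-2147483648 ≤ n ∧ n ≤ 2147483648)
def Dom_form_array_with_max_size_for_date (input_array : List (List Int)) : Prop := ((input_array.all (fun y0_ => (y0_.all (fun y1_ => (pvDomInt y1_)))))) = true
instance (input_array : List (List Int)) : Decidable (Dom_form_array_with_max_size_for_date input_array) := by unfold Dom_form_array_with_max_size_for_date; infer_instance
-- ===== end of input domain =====

-- B replaces A's incremental nested rescans by two staged passes: bucket the rows by key
-- into a dict of groups, then reduce each group with max(key=size) (objective: alternative).
-- Both A and B mutate their input rows in place (same resulting values); the equivalence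
-- proved here is about the return value.

-- ===== PORT A =====
-- A's inner `for j in range(len(output_array))` with break: returns `some out'`
-- when some row with the same key was found (flag = True; out' is output_array after
-- the conditional in-place update), `none` when the scan fell through (flag stays False).
def pvInnerA (row : List Int) : List (List Int) → Option (List (List Int))
  | [] => none
  | o :: rest =>
    if row.getD 0 0 = o.getD 0 0 then
      some (if row.getD 2 0 > o.getD 2 0 then
              ((o.set 1 (row.getD 1 0)).set 2 (row.getD 2 0)) :: rest
            else o :: rest)
    else (pvInnerA row rest).map (o :: ·)

-- body of A's outer loop (one i of range(1, len(input_array)))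
def pvStepA (out : List (List Int)) (row : List Int) : List (List Int) :=
  match pvInnerA row out with
  | some out' => out'
  | none => out ++ [row]

def form_array_with_max_size_for_date (input_array : List (List Int)) : List (List Int) :=
  match input_array with
  | [] => []          -- Python raises IndexError on input_array[0]; excluded by Pre_
  | h :: t => t.foldl pvStepA [h]

-- ===== PORT B =====
-- `for rows in groups.values(): first = rows[0]; if len(rows) > 1: w = max(rows, key=r[2]); first[1], first[2] = w[1], w[2]`
def pvReduceB (rows : List (List Int)) : List Int :=
  match rows with
  | [] => []          -- unreachable: every group a bucketing pass builds is nonempty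
  | first :: rest =>
    if rest.isEmpty then first
    else
      match PySem.List.max? (first :: rest) (fun r => r.getD 2 0) with
      | some w => (first.set 1 (w.getD 1 0)).set 2 (w.getD 2 0)
      | none => first   -- unreachable: the list is nonempty

def form_array_with_max_size_for_date_alt (input_array : List (List Int)) : List (List Int) :=
  -- Stage 1: groups.setdefault(row[0], []).append(row)
  let groups := input_array.foldl
    (fun d row => d.modify (row.getD 0 0) [] (· ++ [row])) (PySem.Dict.empty)
  -- Stage 2: reduce each group (first-seen key order = dict value order)
  groups.values.map pvReduceB

-- ===== PRECONDITION & SPEC =====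
-- Pre_ excludes the empty list and empty rows (A raises IndexError reading row[0],
-- except on the single input [[]], where B raises while A returns), and rows shorter
-- than 3 whose key occurs more than once, on which A raises IndexError reading index 2
-- when the keys collide (rows are expected to be [date, name, size] log records).
def Pre_form_array_with_max_size_for_date (input_array : List (List Int)) : Prop :=
  input_array ≠ [] ∧ ∀ row ∈ input_array, row ≠ [] ∧
    (3 ≤ row.length ∨ (input_array.map (fun r => r.getD 0 0)).count (row.getD 0 0) = 1)
instance (input_array : List (List Int)) : Decidable (Pre_form_array_with_max_size_for_date input_array) := by unfold Pre_form_array_with_max_size_for_date; infer_instance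

def pvWitness_form_array_with_max_size_for_date : List (List Int) :=
  [[1, 10, 5], [2, 20, 7], [1, 30, 9]]

def Spec_form_array_with_max_size_for_date (input_array : List (List Int)) (out : List (List Int)) : Prop := out = form_array_with_max_size_for_date_alt input_array
instance (input_array : List (List Int)) (out : List (List Int)) : Decidable (Spec_form_array_with_max_size_for_date input_array out) := by unfold Spec_form_array_with_max_size_for_date; infer_instance

-- ===== CLAIM (what is proved, stated in full; the proofs are below) =====
def Claim_equal_form_array_with_max_size_for_date : Prop := ∀ (input_array : List (List Int)), Dom_form_array_with_max_size_for_date input_array → Pre_form_array_with_max_size_for_date input_array → Spec_form_array_with_max_size_for_date input_array (form_array_with_max_size_for_date input_array)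

-- ===== LEMMAS AND PROOFS =====

-- A's conditional in-place update of one output row (proof-side name for A's branch)
def pvUpdA (cur row : List Int) : List Int :=
  if row.getD 2 0 > cur.getD 2 0 then (cur.set 1 (row.getD 1 0)).set 2 (row.getD 2 0) else cur

-- running first-argmax step (the foldl hidden inside PySem.List.max?)
def pvMaxStep (m r : List Int) : List Int :=
  if m.getD 2 0 < r.getD 2 0 then r else m

-- A's final value for one key group (head = first occurrence, A-updates folded over the rest)
def pvRed (g : List (List Int)) : List Int :=
  match g with
  | [] => []
  | f :: rest => rest.foldl pvUpdA f

-- A's whole output, characterised group-wise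
def pvG (l : List (List Int)) : List (List Int) :=
  (PySem.Set.ofList (l.map (fun r => r.getD 0 0))).map
    (fun c => pvRed (l.filter (fun r => r.getD 0 0 == c)))

theorem pvUpdA_key (cur row : List Int) : (pvUpdA cur row).getD 0 0 = cur.getD 0 0 := by
  unfold pvUpdA
  split_ifs with h
  · simp [List.getD]
  · rfl

theorem pvRed_key (rest : List (List Int)) : ∀ f : List Int,
    (rest.foldl pvUpdA f).getD 0 0 = f.getD 0 0 := by
  induction rest with
  | nil => intro f; rfl
  | cons r rest ih => intro f; rw [List.foldl_cons, ih, pvUpdA_key]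

-- A's inner scan on an output list presented as keys mapped through f
theorem pvInnerA_map (row : List Int) (K : List Int) (f : Int → List Int)
    (hK : K.Nodup) (hf : ∀ c ∈ K, (f c).getD 0 0 = c) :
    pvInnerA row (K.map f) =
      if row.getD 0 0 ∈ K then
        some (K.map (fun c => if c = row.getD 0 0 then pvUpdA (f c) row else f c))
      else none := by
  induction K with
  | nil => simp [pvInnerA]
  | cons c K ih =>
    have hfc : (f c).getD 0 0 = c := hf c (by simp)
    simp only [List.map_cons, pvInnerA, hfc]
    by_cases h : row.getD 0 0 = c
    · subst h
      have hhead : (if row.getD 2 0 > (f (row.getD 0 0)).getD 2 0 then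
              ((f (row.getD 0 0)).set 1 (row.getD 1 0)).set 2 (row.getD 2 0) :: K.map f
            else f (row.getD 0 0) :: K.map f) = pvUpdA (f (row.getD 0 0)) row :: K.map f := by
        unfold pvUpdA; split_ifs <;> rfl
      rw [if_pos rfl, hhead, if_pos (List.mem_cons_self)]
      have htail : ∀ c' ∈ K, f c' = (if c' = row.getD 0 0 then pvUpdA (f c') row else f c') := by
        intro c' hc'
        have hne : c' ≠ row.getD 0 0 := by
          intro he; exact (List.nodup_cons.mp hK).1 (he ▸ hc')
        rw [if_neg hne]
      rw [if_pos rfl, List.map_congr_left htail]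
    · rw [ih (List.nodup_cons.mp hK).2 (fun c' hc' => hf c' (List.mem_cons_of_mem _ hc'))]
      have hne : ¬ (row.getD 0 0 = c) := h
      by_cases hm : row.getD 0 0 ∈ K
      · rw [if_neg hne, if_pos hm, if_pos (List.mem_cons_of_mem _ hm), Option.map_some,
            if_neg (fun he : c = row.getD 0 0 => hne he.symm)]
      · rw [if_neg hne, if_neg hm, Option.map_none,
            if_neg (fun hmem => (List.mem_cons.mp hmem).elim hne hm)]

-- k ∈ keys of l  ↔  the k-group is nonempty
theorem pvFilter_ne_nil (l : List (List Int)) (k : Int)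
    (h : k ∈ l.map (fun r => r.getD 0 0)) :
    l.filter (fun r => r.getD 0 0 == k) ≠ [] := by
  obtain ⟨r, hr, hk⟩ := List.mem_map.mp h
  intro hnil
  have := List.filter_eq_nil_iff.mp hnil r hr
  exact this (beq_iff_eq.mpr hk)

theorem pvFilter_nil_of_not_mem (l : List (List Int)) (k : Int)
    (h : k ∉ l.map (fun r => r.getD 0 0)) :
    l.filter (fun r => r.getD 0 0 == k) = [] := by
  apply List.filter_eq_nil_iff.mpr
  intro r hr
  simp only [beq_iff_eq]
  intro he
  exact h (List.mem_map.mpr ⟨r, hr, he⟩)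

theorem pvG_key (l : List (List Int)) (c : Int)
    (h : c ∈ PySem.Set.ofList (l.map (fun r => r.getD 0 0))) :
    (pvRed (l.filter (fun r => r.getD 0 0 == c))).getD 0 0 = c := by
  have hc : c ∈ l.map (fun r => r.getD 0 0) := (PySem.Set.mem_ofList _ _).mp h
  cases hg : l.filter (fun r => r.getD 0 0 == c) with
  | nil => exact absurd hg (pvFilter_ne_nil l c hc)
  | cons g gs =>
    have : g ∈ l.filter (fun r => r.getD 0 0 == c) := by rw [hg]; simp
    have hgk : g.getD 0 0 = c := by
      have := List.of_mem_filter this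
      simpa using this
    simp only [pvRed]
    rw [pvRed_key, hgk]

-- one A-step on the group-wise characterisation
theorem pvStepA_G (l : List (List Int)) (row : List Int) :
    pvStepA (pvG l) row = pvG (l ++ [row]) := by
  set key : List Int → Int := fun r => r.getD 0 0 with hkey
  set K := PySem.Set.ofList (l.map key) with hKdef
  set f : Int → List Int := fun c => pvRed (l.filter (fun r => key r == c)) with hfdef
  have hK : K.Nodup := PySem.Set.nodup_ofList _
  have hf : ∀ c ∈ K, (f c).getD 0 0 = c := fun c hc => pvG_key l c hc
  have hGl : pvG l = K.map f := rfl
  have hfilter : ∀ c, (l ++ [row]).filter (fun r => key r == c) =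
      l.filter (fun r => key r == c) ++ (if key row = c then [row] else []) := by
    intro c
    rw [List.filter_append]
    congr 1
    by_cases h : key row = c <;> simp [h]
  have hkeys : PySem.Set.ofList ((l ++ [row]).map key) = PySem.Set.add K (key row) := by
    rw [List.map_append, List.map_singleton, PySem.Set.ofList_append_singleton]
  unfold pvStepA
  rw [hGl, pvInnerA_map row K f hK hf]
  by_cases hmem : key row ∈ K
  · rw [if_pos hmem]
    show List.map (fun c => if c = key row then pvUpdA (f c) row else f c) K = pvG (l ++ [row])
    unfold pvG
    rw [hkeys, PySem.Set.add_of_mem hmem]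
    apply List.map_congr_left
    intro c hc
    rw [hfilter c]
    by_cases h : c = key row
    · rw [if_pos h, if_pos h.symm]
      have hc' : c ∈ l.map key := (PySem.Set.mem_ofList _ _).mp (hKdef ▸ hc)
      cases hg : l.filter (fun r => key r == c) with
      | nil => exact absurd hg (pvFilter_ne_nil l c hc')
      | cons g gs =>
        show pvUpdA (f c) row = pvRed ((g :: gs) ++ [row])
        rw [hfdef]
        simp only [hg]
        show pvUpdA (pvRed (g :: gs)) row = pvRed (g :: (gs ++ [row]))
        simp only [pvRed, List.foldl_append, List.foldl_cons, List.foldl_nil]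
    · rw [if_neg h, if_neg (fun he => h he.symm), List.append_nil, hfdef]
  · rw [if_neg hmem]
    show List.map f K ++ [row] = pvG (l ++ [row])
    unfold pvG
    rw [hkeys, PySem.Set.add_of_not_mem hmem, List.map_append]
    congr 1
    · apply List.map_congr_left
      intro c hc
      rw [hfilter c]
      have h : c ≠ key row := fun he => hmem (he ▸ hc)
      rw [if_neg (fun he => h he.symm), List.append_nil, hfdef]
    · simp only [List.map_singleton]
      rw [hfilter (key row), if_pos rfl,
          pvFilter_nil_of_not_mem l (key row) (fun h => hmem ((PySem.Set.mem_ofList _ _).mpr h))]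
      rfl

theorem pvFoldA_G (t : List (List Int)) : ∀ l : List (List Int),
    t.foldl pvStepA (pvG l) = pvG (l ++ t) := by
  induction t with
  | nil => intro l; simp
  | cons r t ih =>
    intro l
    rw [List.foldl_cons, pvStepA_G, ih (l ++ [r])]
    simp

theorem pvG_singleton (h : List Int) : pvG [h] = [h] := by
  simp [pvG, PySem.Set.ofList, pvRed]

theorem pvA_eq_G (h : List Int) (t : List (List Int)) :
    form_array_with_max_size_for_date (h :: t) = pvG (h :: t) := by
  show t.foldl pvStepA [h] = _
  rw [← pvG_singleton h, pvFoldA_G t [h]]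
  rfl

-- ---- B side ----

theorem pvB_eq (l : List (List Int)) :
    form_array_with_max_size_for_date_alt l =
      (PySem.Set.ofList (l.map (fun r => r.getD 0 0))).map
        (fun c => pvReduceB (l.filter (fun r => r.getD 0 0 == c))) := by
  unfold form_array_with_max_size_for_date_alt
  show ((l.foldl (fun d row => d.modify (row.getD 0 0) [] (· ++ [row])) PySem.Dict.empty).values).map pvReduceB = _
  set key : List Int → Int := fun r => r.getD 0 0 with hkey
  set d := l.foldl (fun d row => d.modify (key row) [] (· ++ [row])) PySem.Dict.empty with hd
  have hkeys : d.keys = PySem.Set.ofList (l.map key) := by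
    rw [hd, PySem.Dict.keys_foldl_modify_key]
    simp [PySem.Set.update_nil_left]
  have hnd : d.keys.Nodup := hkeys ▸ PySem.Set.nodup_ofList _
  have hvals : d.values = d.keys.map (fun c => d.getD c []) :=
    PySem.Dict.values_eq_map_keys d hnd []
  have hgetD : ∀ c, d.getD c [] = l.filter (fun r => key r == c) := by
    intro c
    have hmapfold : d = (l.map (fun r => (key r, r))).foldl
        (fun d p => d.modify p.1 [] (· ++ [p.2])) PySem.Dict.empty := by
      rw [hd, List.foldl_map]
    rw [hmapfold, PySem.Dict.getD_foldl_modify_append]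
    rw [List.filter_map]
    simp [Function.comp_def]
  rw [hvals, hkeys, List.map_map]
  apply List.map_congr_left
  intro c hc
  simp only [Function.comp_def]
  rw [hgetD c]

-- running strict-max update fold = first-argmax, written back into the first row
theorem pvFold_max (rest : List (List Int)) (f : List Int) (hf : 3 ≤ f.length)
    (hrest : ∀ r ∈ rest, 3 ≤ r.length) :
    rest.foldl pvUpdA f =
      (f.set 1 ((rest.foldl pvMaxStep f).getD 1 0)).set 2 ((rest.foldl pvMaxStep f).getD 2 0) := by
  induction rest using List.reverseRecOn with
  | nil =>
    simp only [List.foldl_nil]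
    have h1 : f.getD 1 0 = f[1] := by
      rw [List.getD_eq_getElem?_getD, List.getElem?_eq_getElem (by omega)]; rfl
    have h2 : f.getD 2 0 = f[2] := by
      rw [List.getD_eq_getElem?_getD, List.getElem?_eq_getElem (by omega)]; rfl
    rw [h1, h2, List.set_getElem_self, List.set_getElem_self]
  | append_singleton rest r ih =>
    have hr : 3 ≤ r.length := hrest r (by simp)
    have hrest' : ∀ x ∈ rest, 3 ≤ x.length := fun x hx => hrest x (by simp [hx])
    rw [List.foldl_append, List.foldl_append, List.foldl_cons, List.foldl_nil,
        List.foldl_cons, List.foldl_nil, ih hrest']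
    set m := rest.foldl pvMaxStep f with hm
    have hlen : ((f.set 1 (m.getD 1 0)).set 2 (m.getD 2 0)).length = f.length := by simp
    have hkey2 : ((f.set 1 (m.getD 1 0)).set 2 (m.getD 2 0)).getD 2 0 = m.getD 2 0 := by
      rw [List.getD_eq_getElem?_getD, List.getElem?_set_self (by simp; omega)]
      rfl
    unfold pvUpdA pvMaxStep
    rw [hkey2]
    by_cases h : m.getD 2 0 < r.getD 2 0
    · rw [if_pos (by exact h), if_pos h]
      rw [List.set_comm _ _ (by omega : (2:Nat) ≠ 1), List.set_set, List.set_set]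
    · rw [if_neg (by exact h), if_neg h]

-- max? (f :: rest) = some (running max fold)
theorem pvMax?_cons (f : List Int) (rest : List (List Int)) :
    PySem.List.max? (f :: rest) (fun r => r.getD 2 0) = some (rest.foldl pvMaxStep f) := by
  show List.foldl _ (some f) rest = _
  induction rest generalizing f with
  | nil => rfl
  | cons r rest ih =>
    show List.foldl _ (if f.getD 2 0 < r.getD 2 0 then some r else some f) rest =
      some (List.foldl pvMaxStep (pvMaxStep f r) rest)
    rw [show pvMaxStep f r = if f.getD 2 0 < r.getD 2 0 then r else f from rfl]
    by_cases h : f.getD 2 0 < r.getD 2 0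
    · rw [if_pos h, if_pos h]; exact ih r
    · rw [if_neg h, if_neg h]; exact ih f

-- A's per-group reduction = B's per-group reduction (rows of a multi-row group have length ≥ 3)
theorem pvRed_eq_reduceB' (f : List Int) (rest : List (List Int))
    (h3 : rest ≠ [] → ∀ r ∈ f :: rest, 3 ≤ r.length) :
    pvRed (f :: rest) = pvReduceB (f :: rest) := by
  cases rest with
  | nil => rfl
  | cons r rest' =>
    have h3' := h3 (by simp)
    simp only [pvRed, pvReduceB]
    rw [pvMax?_cons]
    simp only [List.isEmpty_cons, Bool.false_eq_true, if_false]
    exact pvFold_max (r :: rest') f (h3' f (by simp)) (fun x hx => h3' x (by simp [hx]))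

-- count of a key = length of its group
theorem pvCount_eq_length (l : List (List Int)) (c : Int) :
    (l.map (fun r => r.getD 0 0)).count c = (l.filter (fun r => r.getD 0 0 == c)).length := by
  rw [List.count_eq_countP, List.countP_map, List.countP_eq_length_filter]
  congr 1

-- ===== VERDICT (by name: the statements are the Claim_ definitions above) =====
theorem form_array_with_max_size_for_date_spec : Claim_equal_form_array_with_max_size_for_date := by
  intro l _ hpre
  unfold Spec_form_array_with_max_size_for_date
  obtain ⟨hne, hrows⟩ := hpre
  obtain ⟨h, t, rfl⟩ : ∃ h t, l = h :: t := by
    cases l with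
    | nil => exact absurd rfl hne
    | cons h t => exact ⟨h, t, rfl⟩
  rw [pvA_eq_G, pvB_eq]
  unfold pvG
  apply List.map_congr_left
  intro c hc
  have hc' : c ∈ (h :: t).map (fun r => r.getD 0 0) := (PySem.Set.mem_ofList _ _).mp hc
  cases hg : (h :: t).filter (fun r => r.getD 0 0 == c) with
  | nil => exact absurd hg (pvFilter_ne_nil _ c hc')
  | cons g gs =>
    apply pvRed_eq_reduceB'
    intro hgs r hr
    have hrl : r ∈ (h :: t) := List.mem_of_mem_filter (by rw [hg]; exact hr)
    have hrk : r.getD 0 0 = c := by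
      have := List.of_mem_filter (p := fun r => r.getD 0 0 == c) (a := r) (by rw [hg]; exact hr)
      simpa using this
    rcases (hrows r hrl).2 with h3 | hcount
    · exact h3
    · exfalso
      rw [hrk, pvCount_eq_length, hg] at hcount
      cases gs with
      | nil => exact hgs rfl
      | cons _ _ => simp at hcount
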